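-- pv_equiv track=rewrite | github.com/rbagchi/git-dataframe-tools | src/git2df/dulwich_diff_parser.py | _parse_diff_output
-- ===== SOURCE A (Python) =====
-- def _parse_diff_output(diff_output: str) -> dict:
--     line_stats = {}
--     current_file_path = None
--     current_additions = 0
--     current_deletions = 0
--
--     for line in diff_output.splitlines():
--         if line.startswith("diff --git"):
--             if current_file_path:
--                 line_stats[current_file_path] = {
--                     "additions": current_additions,
--                     "deletions": current_deletions,
--                 }
--             current_file_path = None
--             current_additions = 0
--             current_deletions = 0
--
--         elif line.startswith("--- a/"):
--             pass
--         elif line.startswith("+++ b/"):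
--             current_file_path = line[6:].strip()
--         elif line.startswith("-") and not line.startswith("---"):
--             current_deletions += 1
--         elif line.startswith("+") and not line.startswith("+++"):
--             current_additions += 1
--
--     if current_file_path:
--         line_stats[current_file_path] = {
--             "additions": current_additions,
--             "deletions": current_deletions,
--         }
--     return line_stats
-- ===== SOURCE B (Python) =====
-- def _parse_diff_output(diff_output: str) -> dict:
--     # Two-phase: split the lines into per-file segments at "diff --git"
--     # boundaries, then summarize each segment independently.
--     segments = []
--     current = []
--     for line in diff_output.splitlines():
--         if line.startswith("diff --git"):
--             segments.append(current)
--             current = []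
--         else:
--             current.append(line)
--     segments.append(current)
--
--     line_stats = {}
--     for segment in segments:
--         paths = [l[6:].strip() for l in segment if l.startswith("+++ b/")]
--         if not paths or not paths[-1]:
--             continue
--         line_stats[paths[-1]] = {
--             "additions": sum(1 for l in segment
--                              if l.startswith("+") and not l.startswith("+++")),
--             "deletions": sum(1 for l in segment
--                              if l.startswith("-") and not l.startswith("---")),
--         }
--     return line_stats
-- ===== Notes on version B (the rewrite author's own statement) =====
-- stated objective: alternative
-- what changed: Replaces A's single-pass mutable state machine (current path/counters flushed at each file-header boundary) by a two-phase decomposition: first split the lines into per-file segments at the diff header boundaries, then summarize each segment independently (last path line wins, counts via comprehensions) into the result dict.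
import Mathlib
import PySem

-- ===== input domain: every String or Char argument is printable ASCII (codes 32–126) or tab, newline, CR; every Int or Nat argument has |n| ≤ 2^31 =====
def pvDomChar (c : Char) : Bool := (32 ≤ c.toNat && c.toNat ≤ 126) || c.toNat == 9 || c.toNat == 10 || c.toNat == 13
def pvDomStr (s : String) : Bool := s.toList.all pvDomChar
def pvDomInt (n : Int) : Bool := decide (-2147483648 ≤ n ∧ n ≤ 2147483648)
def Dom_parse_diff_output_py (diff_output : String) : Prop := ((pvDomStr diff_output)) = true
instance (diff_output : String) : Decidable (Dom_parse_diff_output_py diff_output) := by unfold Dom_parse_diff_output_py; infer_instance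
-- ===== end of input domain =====

-- B replaces A's one-pass flush-on-boundary state machine by a two-phase decomposition
-- (split lines into per-file segments, then summarize each segment); same cost, equal return value.


-- ===== PORT A =====
-- the dict-store block A writes twice: `if current_file_path: line_stats[p] = {...}`
def pvFlushA (path : Option String) (adds dels : Int)
    (stats : PySem.Dict String (List (String × Int))) : PySem.Dict String (List (String × Int)) :=
  match path with
  | none => stats
  | some p => if p = "" then stats else stats.insert p [("additions", adds), ("deletions", dels)]

-- body of A's for-loop over (current_file_path, current_additions, current_deletions, line_stats)
def pvStepA (st : Option String × Int × Int × PySem.Dict String (List (String × Int)))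
    (line : String) : Option String × Int × Int × PySem.Dict String (List (String × Int)) :=
  if PySem.Str.startswith line "diff --git" then
    (none, 0, 0, pvFlushA st.1 st.2.1 st.2.2.1 st.2.2.2)
  else if PySem.Str.startswith line "--- a/" then st
  else if PySem.Str.startswith line "+++ b/" then
    (some (PySem.Str.strip (PySem.Str.slice line (some 6) none)), st.2.1, st.2.2.1, st.2.2.2)
  else if PySem.Str.startswith line "-" && !PySem.Str.startswith line "---" then
    (st.1, st.2.1, st.2.2.1 + 1, st.2.2.2)
  else if PySem.Str.startswith line "+" && !PySem.Str.startswith line "+++" then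
    (st.1, st.2.1 + 1, st.2.2.1, st.2.2.2)
  else st

def parse_diff_output_py (diff_output : String) : List (String × List (String × Int)) :=
  let st := (PySem.Str.splitlines diff_output).foldl pvStepA (none, 0, 0, PySem.Dict.empty)
  (pvFlushA st.1 st.2.1 st.2.2.1 st.2.2.2).items

-- ===== PORT B =====
-- paths = [l[6:].strip() for l in segment if l.startswith("+++ b/")]
def pvPaths (segment : List String) : List String :=
  (segment.filter (fun l => PySem.Str.startswith l "+++ b/")).map
    (fun l => PySem.Str.strip (PySem.Str.slice l (some 6) none))

-- additions = sum(1 for l in segment if l.startswith("+") and not l.startswith("+++"))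
def pvAdds (segment : List String) : Int :=
  (segment.countP (fun l => PySem.Str.startswith l "+" && !PySem.Str.startswith l "+++") : Int)

-- deletions = sum(1 for l in segment if l.startswith("-") and not l.startswith("---"))
def pvDels (segment : List String) : Int :=
  (segment.countP (fun l => PySem.Str.startswith l "-" && !PySem.Str.startswith l "---") : Int)

-- body of B's segment loop (skip when `not paths or not paths[-1]`)
def pvSegStep (stats : PySem.Dict String (List (String × Int))) (segment : List String) :
    PySem.Dict String (List (String × Int)) :=
  match (pvPaths segment).getLast? with
  | none => stats
  | some p =>
    if p = "" then stats
    else stats.insert p [("additions", pvAdds segment), ("deletions", pvDels segment)]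

-- body of B's splitting loop over (segments, current)
def pvSplitStep (acc : List (List String) × List String) (line : String) :
    List (List String) × List String :=
  if PySem.Str.startswith line "diff --git" then (acc.1 ++ [acc.2], [])
  else (acc.1, acc.2 ++ [line])

def parse_diff_output_py_alt (diff_output : String) : List (String × List (String × Int)) :=
  let sp := (PySem.Str.splitlines diff_output).foldl pvSplitStep ([], [])
  let segs := sp.1 ++ [sp.2]
  (segs.foldl pvSegStep PySem.Dict.empty).items

-- ===== PRECONDITION & SPEC =====
def Spec_parse_diff_output_py (diff_output : String) (out : List (String × List (String × Int))) : Prop := out = parse_diff_output_py_alt diff_output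
instance (diff_output : String) (out : List (String × List (String × Int))) : Decidable (Spec_parse_diff_output_py diff_output out) := by unfold Spec_parse_diff_output_py; infer_instance

-- ===== CLAIM (what is proved, stated in full; the proofs are below) =====
def Claim_equal_parse_diff_output_py : Prop := ∀ (diff_output : String), Dom_parse_diff_output_py diff_output → Spec_parse_diff_output_py diff_output (parse_diff_output_py diff_output)

-- ===== LEMMAS AND PROOFS =====

-- A's per-line transition restricted to non-boundary lines, acting on the triple only
def pvStepT (st : Option String × Int × Int) (line : String) : Option String × Int × Int :=
  if PySem.Str.startswith line "--- a/" then st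
  else if PySem.Str.startswith line "+++ b/" then
    (some (PySem.Str.strip (PySem.Str.slice line (some 6) none)), st.2.1, st.2.2)
  else if PySem.Str.startswith line "-" && !PySem.Str.startswith line "---" then
    (st.1, st.2.1, st.2.2 + 1)
  else if PySem.Str.startswith line "+" && !PySem.Str.startswith line "+++" then
    (st.1, st.2.1 + 1, st.2.2)
  else st

-- A's loop rephrased tail-recursively with the final flush built in
def pvRun (st : Option String × Int × Int) (stats : PySem.Dict String (List (String × Int))) :
    List String → PySem.Dict String (List (String × Int))
  | [] => pvFlushA st.1 st.2.1 st.2.2 stats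
  | l :: ls =>
    if PySem.Str.startswith l "diff --git" then
      pvRun (none, 0, 0) (pvFlushA st.1 st.2.1 st.2.2 stats) ls
    else pvRun (pvStepT st l) stats ls

-- the last "+++ b/" path of a segment, defaulting to the incoming one
def pvLastD (xs : List String) (p : Option String) : Option String :=
  match xs.getLast? with | some q => some q | none => p

lemma pv_mono (l p q : String) (hpq : p.toList <+: q.toList)
    (h : PySem.Str.startswith l q = true) : PySem.Str.startswith l p = true := by
  simp only [PySem.Str.startswith_eq, PySem.Chars.startswith_iff] at *
  exact hpq.trans h

lemma pv_head (l p : String) (c : Char) (hp : p.toList.head? = some c)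
    (h : PySem.Str.startswith l p = true) : l.toList.head? = some c := by
  simp only [PySem.Str.startswith_eq, PySem.Chars.startswith_iff] at h
  obtain ⟨t, ht⟩ := h
  cases hl : p.toList with
  | nil => simp [hl] at hp
  | cons x xs => rw [hl] at ht hp; simp at hp; rw [← ht]; simp [hp]

-- a line cannot start with two prefixes whose first characters differ
lemma pv_sw_ne (l p q : String) (c c' : Char) (hp : p.toList.head? = some c)
    (hq : q.toList.head? = some c') (hne : c ≠ c')
    (h : PySem.Str.startswith l p = true) : PySem.Str.startswith l q = false := by
  by_contra hq'
  have h2 : PySem.Str.startswith l q = true := by simpa using hq'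
  have e1 := pv_head l p c hp h
  have e2 := pv_head l q c' hq h2
  rw [e1] at e2
  exact hne (Option.some.inj e2)

lemma pv_stepA_boundary (st : Option String × Int × Int × PySem.Dict String (List (String × Int)))
    (l : String) (h : PySem.Str.startswith l "diff --git" = true) :
    pvStepA st l = (none, 0, 0, pvFlushA st.1 st.2.1 st.2.2.1 st.2.2.2) := by
  unfold pvStepA; rw [h]; rfl

lemma pv_stepA_other (st : Option String × Int × Int × PySem.Dict String (List (String × Int)))
    (l : String) (h : PySem.Str.startswith l "diff --git" = false) :
    pvStepA st l = ((pvStepT (st.1, st.2.1, st.2.2.1) l).1, (pvStepT (st.1, st.2.1, st.2.2.1) l).2.1,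
      (pvStepT (st.1, st.2.1, st.2.2.1) l).2.2, st.2.2.2) := by
  unfold pvStepA pvStepT; rw [h, if_neg (by decide)]
  split_ifs <;> rfl

-- A's fold followed by the final flush IS pvRun
lemma pv_A_run : ∀ (lines : List String) (p : Option String) (a d : Int)
    (stats : PySem.Dict String (List (String × Int))),
    pvFlushA (lines.foldl pvStepA (p, a, d, stats)).1 (lines.foldl pvStepA (p, a, d, stats)).2.1
      (lines.foldl pvStepA (p, a, d, stats)).2.2.1 (lines.foldl pvStepA (p, a, d, stats)).2.2.2
      = pvRun (p, a, d) stats lines := by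
  intro lines
  induction lines with
  | nil => intro p a d stats; rfl
  | cons l ls ih =>
    intro p a d stats
    by_cases h : PySem.Str.startswith l "diff --git" = true
    · simp only [List.foldl_cons, pv_stepA_boundary _ _ h, pvRun, h, if_pos]
      exact ih none 0 0 _
    · rw [Bool.not_eq_true] at h
      simp only [List.foldl_cons, pv_stepA_other _ _ h, pvRun, h]
      rw [if_neg (by decide)]
      have := ih (pvStepT (p, a, d) l).1 (pvStepT (p, a, d) l).2.1 (pvStepT (p, a, d) l).2.2 stats
      simpa using this

-- cons-step facts about B's three per-segment summaries
lemma pv_paths_cons_t (l : String) (ls : List String)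
    (h : PySem.Str.startswith l "+++ b/" = true) :
    pvPaths (l :: ls) = PySem.Str.strip (PySem.Str.slice l (some 6) none) :: pvPaths ls := by
  simp only [pvPaths, List.filter_cons, h, if_true, List.map_cons]

lemma pv_paths_cons_f (l : String) (ls : List String)
    (h : PySem.Str.startswith l "+++ b/" = false) :
    pvPaths (l :: ls) = pvPaths ls := by
  simp only [pvPaths, List.filter_cons, h, Bool.false_eq_true, if_false]

lemma pv_adds_cons_t (l : String) (ls : List String)
    (h : (PySem.Str.startswith l "+" && !PySem.Str.startswith l "+++") = true) :
    pvAdds (l :: ls) = pvAdds ls + 1 := by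
  simp only [pvAdds, List.countP_cons, h, if_true]; push_cast; ring

lemma pv_adds_cons_f (l : String) (ls : List String)
    (h : (PySem.Str.startswith l "+" && !PySem.Str.startswith l "+++") = false) :
    pvAdds (l :: ls) = pvAdds ls := by
  simp only [pvAdds, List.countP_cons, h, Bool.false_eq_true, if_false, Nat.add_zero]

lemma pv_dels_cons_t (l : String) (ls : List String)
    (h : (PySem.Str.startswith l "-" && !PySem.Str.startswith l "---") = true) :
    pvDels (l :: ls) = pvDels ls + 1 := by
  simp only [pvDels, List.countP_cons, h, if_true]; push_cast; ring

lemma pv_dels_cons_f (l : String) (ls : List String)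
    (h : (PySem.Str.startswith l "-" && !PySem.Str.startswith l "---") = false) :
    pvDels (l :: ls) = pvDels ls := by
  simp only [pvDels, List.countP_cons, h, Bool.false_eq_true, if_false, Nat.add_zero]

lemma pv_lastD_cons (x : String) (xs : List String) (p : Option String) :
    pvLastD (x :: xs) p = pvLastD xs (some x) := by
  unfold pvLastD
  cases hg : xs.getLast? <;> simp [List.getLast?_cons, hg]

lemma pv_and_left {x y : Bool} (h : (x && y) = true) : x = true := by
  revert h; cases x <;> simp

-- scanning a segment with A's per-line transition = B's three summaries of the segment
lemma pv_scan : ∀ (seg : List String) (p : Option String) (a d : Int),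
    seg.foldl pvStepT (p, a, d) = (pvLastD (pvPaths seg) p, a + pvAdds seg, d + pvDels seg) := by
  intro seg
  induction seg with
  | nil => intro p a d; simp [pvPaths, pvAdds, pvDels, pvLastD]
  | cons l ls ih =>
    intro p a d
    rw [List.foldl_cons]
    by_cases h1 : PySem.Str.startswith l "--- a/" = true
    · have hm : PySem.Str.startswith l "---" = true := pv_mono l _ _ (by decide) h1
      have hd : PySem.Str.startswith l "-" = true := pv_mono l _ _ (by decide) h1
      have hpb : PySem.Str.startswith l "+++ b/" = false :=
        pv_sw_ne l "-" "+++ b/" '-' '+' (by decide) (by decide) (by decide) hd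
      have hp : PySem.Str.startswith l "+" = false :=
        pv_sw_ne l "-" "+" '-' '+' (by decide) (by decide) (by decide) hd
      have hstep : pvStepT (p, a, d) l = (p, a, d) := by unfold pvStepT; rw [if_pos h1]
      rw [hstep, ih p a d, pv_paths_cons_f l ls hpb,
        pv_adds_cons_f l ls (by rw [hp]; rfl), pv_dels_cons_f l ls (by rw [hm]; simp)]
    · by_cases h2 : PySem.Str.startswith l "+++ b/" = true
      · have hm : PySem.Str.startswith l "+++" = true := pv_mono l _ _ (by decide) h2
        have hp : PySem.Str.startswith l "+" = true := pv_mono l _ _ (by decide) h2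
        have hd : PySem.Str.startswith l "-" = false :=
          pv_sw_ne l "+" "-" '+' '-' (by decide) (by decide) (by decide) hp
        have hstep : pvStepT (p, a, d) l =
            (some (PySem.Str.strip (PySem.Str.slice l (some 6) none)), a, d) := by
          unfold pvStepT; rw [if_neg h1, if_pos h2]
        rw [hstep, ih _ a d, pv_paths_cons_t l ls h2, pv_lastD_cons,
          pv_adds_cons_f l ls (by rw [hm]; simp), pv_dels_cons_f l ls (by rw [hd]; rfl)]
      · by_cases h3 : (PySem.Str.startswith l "-" && !PySem.Str.startswith l "---") = true
        · have hd : PySem.Str.startswith l "-" = true := pv_and_left h3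
          have hp : PySem.Str.startswith l "+" = false :=
            pv_sw_ne l "-" "+" '-' '+' (by decide) (by decide) (by decide) hd
          have hpb : PySem.Str.startswith l "+++ b/" = false :=
            pv_sw_ne l "-" "+++ b/" '-' '+' (by decide) (by decide) (by decide) hd
          have hstep : pvStepT (p, a, d) l = (p, a, d + 1) := by
            unfold pvStepT; rw [if_neg h1, if_neg h2, if_pos h3]
          rw [hstep, ih p a (d + 1), pv_paths_cons_f l ls hpb,
            pv_adds_cons_f l ls (by rw [hp]; rfl), pv_dels_cons_t l ls h3]
          refine congrArg _ (congrArg _ ?_)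
          ring
        · by_cases h4 : (PySem.Str.startswith l "+" && !PySem.Str.startswith l "+++") = true
          · have hp : PySem.Str.startswith l "+" = true := pv_and_left h4
            have hd : PySem.Str.startswith l "-" = false :=
              pv_sw_ne l "+" "-" '+' '-' (by decide) (by decide) (by decide) hp
            have hpb : PySem.Str.startswith l "+++ b/" = false := by
              cases hx : PySem.Str.startswith l "+++ b/" with
              | false => rfl
              | true =>
                have : PySem.Str.startswith l "+++" = true := pv_mono l _ _ (by decide) hx
                rw [this] at h4; simp at h4
            have hstep : pvStepT (p, a, d) l = (p, a + 1, d) := by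
              unfold pvStepT; rw [if_neg h1, if_neg h2, if_neg h3, if_pos h4]
            rw [hstep, ih p (a + 1) d, pv_paths_cons_f l ls hpb,
              pv_adds_cons_t l ls h4, pv_dels_cons_f l ls (by rw [hd]; rfl)]
            refine congrArg _ ?_
            rw [Prod.mk.injEq]
            exact ⟨by ring, rfl⟩
          · have hpb : PySem.Str.startswith l "+++ b/" = false := by
              cases hx : PySem.Str.startswith l "+++ b/" with
              | false => rfl
              | true => exact absurd hx h2
            have hstep : pvStepT (p, a, d) l = (p, a, d) := by
              unfold pvStepT; rw [if_neg h1, if_neg h2, if_neg h3, if_neg h4]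
            rw [hstep, ih p a d, pv_paths_cons_f l ls hpb,
              pv_adds_cons_f l ls (by revert h4; cases (PySem.Str.startswith l "+" && !PySem.Str.startswith l "+++") <;> simp),
              pv_dels_cons_f l ls (by revert h3; cases (PySem.Str.startswith l "-" && !PySem.Str.startswith l "---") <;> simp)]

-- flushing the triple scanned from a fresh segment = B's per-segment step
lemma pv_flush_scan (seg : List String) (stats : PySem.Dict String (List (String × Int))) :
    pvFlushA (seg.foldl pvStepT (none, 0, 0)).1 (seg.foldl pvStepT (none, 0, 0)).2.1
      (seg.foldl pvStepT (none, 0, 0)).2.2 stats = pvSegStep stats seg := by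
  rw [pv_scan seg none 0 0]
  unfold pvFlushA pvSegStep pvLastD
  cases hg : (pvPaths seg).getLast? with
  | none => rfl
  | some q => simp

-- accumulator extraction for B's splitting fold
lemma pv_split_acc : ∀ (ls : List String) (segs : List (List String)) (cur : List String),
    ls.foldl pvSplitStep (segs, cur) =
      (segs ++ (ls.foldl pvSplitStep ([], cur)).1, (ls.foldl pvSplitStep ([], cur)).2) := by
  intro ls
  induction ls with
  | nil => intro segs cur; simp
  | cons l ls ih =>
    intro segs cur
    by_cases h : PySem.Str.startswith l "diff --git" = true
    · simp only [List.foldl_cons, pvSplitStep, h, if_pos]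
      rw [ih (segs ++ [cur]) [], ih ([] ++ [cur]) []]
      simp
    · rw [Bool.not_eq_true] at h
      simp only [List.foldl_cons, pvSplitStep, h]
      rw [if_neg (by decide)]
      exact ih segs (cur ++ [l])

-- main correspondence: A's stateful run = B's split-then-summarize, for any partial segment
lemma pv_main : ∀ (lines cur : List String) (stats : PySem.Dict String (List (String × Int))),
    pvRun (cur.foldl pvStepT (none, 0, 0)) stats lines =
      ((lines.foldl pvSplitStep ([], cur)).1 ++ [(lines.foldl pvSplitStep ([], cur)).2]).foldl
        pvSegStep stats := by
  intro lines
  induction lines with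
  | nil =>
    intro cur stats
    simp only [List.foldl_nil, List.nil_append, List.foldl_cons, pvRun]
    exact pv_flush_scan cur stats
  | cons l ls ih =>
    intro cur stats
    by_cases h : PySem.Str.startswith l "diff --git" = true
    · simp only [List.foldl_cons, pvRun, h, if_pos, pvSplitStep, List.nil_append]
      have hstep : pvRun (none, 0, 0) (pvFlushA (cur.foldl pvStepT (none, 0, 0)).1
          (cur.foldl pvStepT (none, 0, 0)).2.1 (cur.foldl pvStepT (none, 0, 0)).2.2 stats) ls =
          pvRun (([] : List String).foldl pvStepT (none, 0, 0)) (pvSegStep stats cur) ls := by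
        rw [pv_flush_scan cur stats]; rfl
      rw [hstep, ih [] (pvSegStep stats cur), pv_split_acc ls [cur] []]
      simp
    · rw [Bool.not_eq_true] at h
      simp only [List.foldl_cons, pvRun, h, pvSplitStep]
      rw [if_neg (by decide), if_neg (by decide)]
      have : pvStepT (cur.foldl pvStepT (none, 0, 0)) l = (cur ++ [l]).foldl pvStepT (none, 0, 0) := by
        simp
      rw [this]
      exact ih (cur ++ [l]) stats

-- ===== VERDICT (by name: the statement is the Claim_ definition above) =====
theorem parse_diff_output_py_spec : Claim_equal_parse_diff_output_py := by
  intro s _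
  show parse_diff_output_py s = parse_diff_output_py_alt s
  simp only [parse_diff_output_py, parse_diff_output_py_alt]
  rw [pv_A_run]
  have h : pvRun (none, 0, 0) PySem.Dict.empty (PySem.Str.splitlines s) =
      (((PySem.Str.splitlines s).foldl pvSplitStep ([], [])).1 ++
        [((PySem.Str.splitlines s).foldl pvSplitStep ([], [])).2]).foldl pvSegStep
        PySem.Dict.empty := by
    simpa using pv_main (PySem.Str.splitlines s) [] PySem.Dict.empty
  rw [h]
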